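-- pv_equiv track=rewrite | github.com/kyileiaye2021/CodePath_TIP101 | Unit2/Unit2_Session2/Version3/Prob5.py | remove_duplicates_from_front
-- ===== SOURCE A (Python) =====
-- def remove_duplicates_from_front(nums):
--   map = {}
--   for i in range(len(nums)):
--     map[nums[i]] = i
--     '''
--     if nums[i] in map:
--       map[nums[i]] = i
--     else:
--       map[nums[i]] = i'''
--
--   res_lst = []
--
--   #sorting the dict by its value
--   #sorted() func returns a list of key_value tuples
--   sorted_map_by_value = dict(sorted(map.items(), key=lambda item: item[1]))
--
--   for key in sorted_map_by_value:
--     res_lst.append(key)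
--   return res_lst
-- ===== SOURCE B (Python) =====
-- def remove_duplicates_from_front(nums):
--   seen = set()
--   out = []
--   for x in reversed(nums):
--     if x not in seen:
--       seen.add(x)
--       out.append(x)
--   out.reverse()
--   return out
-- ===== Notes on version B (the rewrite author's own statement) =====
-- stated objective: faster
-- what changed: Replaced the last-index dict + sort-items-by-value pipeline with a single reversed pass that keeps each value's first (i.e. last overall) occurrence in a seen set and reverses the result, so no index table and no sort.
import Mathlib
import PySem

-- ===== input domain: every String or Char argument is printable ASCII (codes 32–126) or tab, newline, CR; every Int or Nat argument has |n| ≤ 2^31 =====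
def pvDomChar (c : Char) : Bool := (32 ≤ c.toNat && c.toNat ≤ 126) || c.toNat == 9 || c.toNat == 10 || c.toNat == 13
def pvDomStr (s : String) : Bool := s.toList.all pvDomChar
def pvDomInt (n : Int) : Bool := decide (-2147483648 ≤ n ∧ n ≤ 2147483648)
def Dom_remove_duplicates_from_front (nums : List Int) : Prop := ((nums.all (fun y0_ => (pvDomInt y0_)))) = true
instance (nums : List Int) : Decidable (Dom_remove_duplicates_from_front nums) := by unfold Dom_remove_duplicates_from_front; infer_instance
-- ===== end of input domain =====

-- B replaces A's last-index dict + sort-by-value pipeline with one reversed pass keeping first-seen values, then a reverse; measured faster, same results.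


-- ===== PORT A =====
def remove_duplicates_from_front (nums : List Int) : List Int :=
  let map : PySem.Dict Int Int :=
    (PySem.List.pyRange 0 (PySem.List.len nums) 1).foldl
      (fun d i => d.insert (PySem.List.pyGetD nums i 0) i) PySem.Dict.empty
  let sorted_map_by_value : PySem.Dict Int Int :=
    PySem.Dict.ofList (PySem.List.sorted map.items (fun item => item.2) false)
  sorted_map_by_value.keys.foldl (fun res_lst key => res_lst ++ [key]) []

-- ===== PORT B =====
def remove_duplicates_from_front_alt (nums : List Int) : List Int :=
  let st := nums.reverse.foldl
      (fun (st : PySem.Set Int × List Int) x =>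
        if PySem.Set.contains st.1 x then st
        else (PySem.Set.add st.1 x, st.2 ++ [x]))
      (PySem.Set.empty, [])
  st.2.reverse

-- ===== PRECONDITION & SPEC =====
def Spec_remove_duplicates_from_front (nums : List Int) (out : List Int) : Prop := out = remove_duplicates_from_front_alt nums
instance (nums : List Int) (out : List Int) : Decidable (Spec_remove_duplicates_from_front nums out) := by unfold Spec_remove_duplicates_from_front; infer_instance

-- ===== CLAIM (what is proved, stated in full; the proofs are below) =====
def Claim_equal_remove_duplicates_from_front : Prop := ∀ (nums : List Int), Dom_remove_duplicates_from_front nums → Spec_remove_duplicates_from_front nums (remove_duplicates_from_front nums)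

-- ===== LEMMAS AND PROOFS =====

-- the common target: unique values ordered by last occurrence (defined by recursion on the reversed list)
def lddRev : List Int → List Int
  | [] => []
  | x :: r => ((lddRev r).erase x) ++ [x]

def ldd (l : List Int) : List Int := lddRev l.reverse

-- last-occurrence index (by recursion on the reversed list; junk 0 outside)
def lidxRev : List Int → Int → Int
  | [], _ => 0
  | x :: r, v => if v = x then (r.length : Int) else lidxRev r v

def lidx (l : List Int) (v : Int) : Int := lidxRev l.reverse v

-- A's dict, rephrased over enumerate
def dA (nums : List Int) : PySem.Dict Int Int :=
  (PySem.List.enumerate nums 0).foldl (fun d p => d.insert p.2 p.1) PySem.Dict.empty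

theorem ldd_append (l : List Int) (x : Int) : ldd (l ++ [x]) = ((ldd l).erase x) ++ [x] := by
  simp [ldd, lddRev]

theorem lidx_append (l : List Int) (x v : Int) :
    lidx (l ++ [x]) v = if v = x then (l.length : Int) else lidx l v := by
  simp [lidx, lidxRev]

theorem mem_lddRev (r : List Int) (v : Int) : v ∈ lddRev r ↔ v ∈ r := by
  induction r with
  | nil => simp [lddRev]
  | cons x r ih =>
    by_cases hvx : v = x
    · simp [lddRev, hvx]
    · simp [lddRev, hvx, List.mem_erase_of_ne hvx, ih]

theorem mem_ldd (l : List Int) (v : Int) : v ∈ ldd l ↔ v ∈ l := by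
  rw [ldd, mem_lddRev, List.mem_reverse]

theorem nodup_lddRev (r : List Int) : (lddRev r).Nodup := by
  induction r with
  | nil => simp [lddRev]
  | cons x r ih =>
    refine List.Nodup.append (ih.erase x) (List.nodup_singleton x) ?_
    intro a ha hb
    simp only [List.mem_singleton] at hb
    subst hb
    exact ((List.Nodup.mem_erase_iff ih).mp ha).1 rfl

theorem nodup_ldd (l : List Int) : (ldd l).Nodup := nodup_lddRev l.reverse

theorem lidx_bounds (l : List Int) (v : Int) (h : v ∈ l) :
    0 ≤ lidx l v ∧ lidx l v < (l.length : Int) := by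
  induction l using List.reverseRecOn with
  | nil => simp at h
  | append_singleton l x ih =>
    rw [lidx_append]
    split_ifs with hvx
    · have hlen : (l ++ [x]).length = l.length + 1 := by simp
      rw [hlen]
      push_cast
      constructor
      · positivity
      · omega
    · simp only [List.mem_append, List.mem_singleton, hvx, or_false] at h
      have := ih h
      have hlen : (l ++ [x]).length = l.length + 1 := by simp
      rw [hlen]
      push_cast
      omega

theorem dA_append (l : List Int) (x : Int) :
    dA (l ++ [x]) = (dA l).insert x (l.length : Int) := by
  simp [dA, PySem.List.enumerate_append, PySem.List.enumerate_cons, PySem.List.enumerate_nil,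
    List.foldl_append]

theorem getD_dA (l : List Int) (v : Int) (h : v ∈ l) : (dA l).getD v 0 = lidx l v := by
  induction l using List.reverseRecOn with
  | nil => simp at h
  | append_singleton l x ih =>
    rw [dA_append, lidx_append, PySem.Dict.getD_insert]
    by_cases hvx : v = x
    · simp [hvx]
    · simp only [List.mem_append, List.mem_singleton, hvx, or_false] at h
      simp [hvx, ih h]

theorem keys_dA (l : List Int) : (dA l).keys = PySem.Set.ofList l := by
  have h := PySem.Dict.keys_foldl_insert_key (PySem.List.enumerate l)
      (fun p : Int × Int => p.2) (fun _ p => p.1) (PySem.Dict.empty (κ := Int) (ν := Int))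
  simpa [dA, PySem.List.map_snd_enumerate, PySem.Set.update_nil_left] using h

theorem pairwise_lidx_ldd (l : List Int) :
    (ldd l).Pairwise (fun a b => lidx l a < lidx l b) := by
  induction l using List.reverseRecOn with
  | nil => simp [ldd, lddRev]
  | append_singleton l x ih =>
    rw [ldd_append]
    have hnd := nodup_ldd l
    have hmem : ∀ y ∈ (ldd l).erase x, y ≠ x ∧ y ∈ l := by
      intro y hy
      have := (List.Nodup.mem_erase_iff hnd).mp hy
      exact ⟨this.1, (mem_ldd l y).mp this.2⟩
    refine List.pairwise_append.mpr ⟨?_, List.pairwise_singleton _ _, ?_⟩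
    · have hp : ((ldd l).erase x).Pairwise (fun a b => lidx l a < lidx l b) :=
        List.Pairwise.sublist List.erase_sublist ih
      refine List.Pairwise.imp_of_mem ?_ hp
      intro a b ha hb hab
      rw [lidx_append, lidx_append, if_neg (hmem a ha).1, if_neg (hmem b hb).1]
      exact hab
    · intro a ha b hb
      simp only [List.mem_singleton] at hb
      subst hb
      rw [lidx_append, lidx_append, if_neg (hmem a ha).1, if_pos rfl]
      exact (lidx_bounds l a (hmem a ha).2).2

theorem sorted_items_dA (l : List Int) :
    PySem.List.sorted (dA l).items (fun item => item.2) false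
      = (ldd l).map (fun k => (k, lidx l k)) := by
  have hkeys := keys_dA l
  have hnd : (dA l).keys.Nodup := by rw [hkeys]; exact PySem.Set.nodup_ofList l
  apply PySem.List.sorted_eq_of_perm_of_pairwise_lt
  · have hitems : (dA l).items = (dA l).keys.map (fun k => (k, (dA l).getD k 0)) :=
      PySem.Dict.items_eq_map_keys (dA l) hnd 0
    have hstep : (ldd l).map (fun k => (k, lidx l k))
        = (ldd l).map (fun k => (k, (dA l).getD k 0)) := by
      apply List.map_congr_left
      intro k hk
      rw [getD_dA l k ((mem_ldd l k).mp hk)]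
    rw [hstep, hitems, hkeys]
    refine List.Perm.map _ ?_
    refine (List.perm_ext_iff_of_nodup (nodup_ldd l) (PySem.Set.nodup_ofList l)).mpr ?_
    intro y
    rw [mem_ldd, PySem.Set.mem_ofList]
  · rw [List.pairwise_map]
    exact pairwise_lidx_ldd l

theorem portA_eq_ldd (nums : List Int) : remove_duplicates_from_front nums = ldd nums := by
  have hfold : (PySem.List.pyRange 0 (PySem.List.len nums) 1).foldl
      (fun d i => d.insert (PySem.List.pyGetD nums i 0) i) PySem.Dict.empty = dA nums := by
    rw [dA, PySem.List.enumerate_eq_map_pyRange nums 0, List.foldl_map]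
  have hitems := PySem.Dict.items_foldl_insert_fresh
      ((ldd nums).map (fun k => (k, lidx nums k)))
      (fun p => p.1) (fun p => p.2) (PySem.Dict.empty (κ := Int) (ν := Int))
      (by intro a _; exact PySem.Dict.contains_empty a.1)
      (by simpa [Function.comp_def] using nodup_ldd nums)
  have hofl : (PySem.Dict.ofList ((ldd nums).map (fun k => (k, lidx nums k)))).items
      = (ldd nums).map (fun k => (k, lidx nums k)) := by
    have h2 : PySem.Dict.ofList ((ldd nums).map (fun k => (k, lidx nums k)))
        = ((ldd nums).map (fun k => (k, lidx nums k))).foldl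
            (fun d p => d.insert p.1 p.2) PySem.Dict.empty := rfl
    rw [h2]
    simpa using hitems
  rw [remove_duplicates_from_front]
  simp only [hfold, sorted_items_dA]
  rw [PySem.List.foldl_append_singleton]
  simp only [PySem.Dict.keys, hofl, List.map_map]
  simp [Function.comp_def]

theorem discard_eq_filter (s : List Int) (x : Int) :
    PySem.Set.discard s x = s.filter (fun y => y != x) := by
  induction s with
  | nil => rfl
  | cons a s ih => simp [PySem.Set.discard, List.filter_cons, bne]

theorem lddRev_eq_dedup_reverse (r : List Int) :
    lddRev r = (PySem.List.dedup r).reverse := by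
  induction r with
  | nil => rfl
  | cons x r ih =>
    have hnd : (PySem.List.dedup r).reverse.Nodup :=
      List.nodup_reverse.mpr (PySem.List.nodup_dedup r)
    rw [lddRev, ih, PySem.List.dedup_eq_ofList (x :: r), PySem.Set.ofList_cons,
      discard_eq_filter, ← PySem.List.dedup_eq_ofList,
      List.Nodup.erase_eq_filter hnd x]
    simp [List.filter_reverse]

theorem bFold (r : List Int) (s : PySem.Set Int) :
    r.foldl (fun (st : PySem.Set Int × List Int) x =>
        if PySem.Set.contains st.1 x then st
        else (PySem.Set.add st.1 x, st.2 ++ [x])) (s, s)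
      = (PySem.Set.update s r, PySem.Set.update s r) := by
  induction r generalizing s with
  | nil => rfl
  | cons x r ih =>
    rw [List.foldl_cons, PySem.Set.update_cons]
    by_cases hc : PySem.Set.contains s x = true
    · have hc' : x ∈ s := (PySem.Set.contains_iff s x).mp hc
      have hadd : PySem.Set.add s x = s := by simp [PySem.Set.add, hc']
      have hstep : (if PySem.Set.contains (s, s).1 x then (s, s)
          else (PySem.Set.add s x, s ++ [x])) = (s, s) := by simp [hc']
      rw [hstep, ih s, hadd]
    · have hc' : x ∉ s := fun h => hc ((PySem.Set.contains_iff s x).mpr h)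
      have hadd : PySem.Set.add s x = s ++ [x] := by simp [PySem.Set.add, hc']
      have hstep : (if PySem.Set.contains (s, s).1 x then (s, s)
          else (PySem.Set.add s x, s ++ [x])) = (s ++ [x], s ++ [x]) := by
        simp [hc']
      rw [hstep, ← hadd, ih (PySem.Set.add s x)]

theorem portB_eq_ldd (nums : List Int) : remove_duplicates_from_front_alt nums = ldd nums := by
  rw [remove_duplicates_from_front_alt]
  have h0 : ((PySem.Set.empty : PySem.Set Int), ([] : List Int))
      = ((PySem.Set.empty : PySem.Set Int), (PySem.Set.empty : PySem.Set Int)) := rfl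
  rw [h0, bFold nums.reverse PySem.Set.empty]
  rw [ldd, lddRev_eq_dedup_reverse, PySem.List.dedup_eq_ofList]
  rw [← PySem.Set.update_nil_left]
  rfl

-- ===== VERDICT (by name: the statement is the Claim_ definition above) =====
theorem remove_duplicates_from_front_spec : Claim_equal_remove_duplicates_from_front := by
  intro nums _
  unfold Spec_remove_duplicates_from_front
  rw [portA_eq_ldd, portB_eq_ldd]
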